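-- pv_equiv track=rewrite | github.com/miliar/Code_Jam_Webscraper | solutions_python/Problem_148/138.py | solve
-- ===== SOURCE A (Python) =====
-- def solve(N, X, S):
--     S = sorted(S)
--     num = 0
--     while len(S) > 1:
--         if S[0] + S[-1] <= X:
--             S = S[1:-1]
--         else:
--             S = S[:-1]
--         num += 1
--
--     if len(S) == 1:
--         num += 1
--     return num
-- ===== SOURCE B (Python) =====
-- def solve(N, X, S):
--     T = sorted(S)
--     i, j, p = 0, len(T) - 1, 0
--     while i < j:
--         if T[i] + T[j] <= X:
--             p += 1
--             i += 1
--         j -= 1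
--     return len(T) - p
-- ===== Notes on version B (the rewrite author's own statement) =====
-- stated objective: faster
-- what changed: Replaces A's repeated list re-slicing loop (each step copies the remaining list and counts one operation) by a single in-place two-pointer sweep over the sorted list that only counts matched pairs and returns len - pairs.
import Mathlib
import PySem

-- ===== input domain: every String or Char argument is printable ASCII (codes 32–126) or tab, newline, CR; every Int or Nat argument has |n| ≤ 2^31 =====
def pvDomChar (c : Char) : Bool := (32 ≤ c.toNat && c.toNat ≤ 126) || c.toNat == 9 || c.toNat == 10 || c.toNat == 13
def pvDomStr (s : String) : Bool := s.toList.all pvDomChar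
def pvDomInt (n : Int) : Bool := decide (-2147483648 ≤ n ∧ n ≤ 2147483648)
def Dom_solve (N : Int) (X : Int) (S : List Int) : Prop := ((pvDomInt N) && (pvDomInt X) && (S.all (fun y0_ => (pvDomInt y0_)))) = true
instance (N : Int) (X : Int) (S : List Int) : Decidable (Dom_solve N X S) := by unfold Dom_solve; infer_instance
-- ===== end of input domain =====

-- B replaces A's slice-and-count loop (which copies the remaining list at every step and
-- counts each operation) by a two-pointer sweep over the sorted list that only counts
-- matched pairs and returns len - pairs (objective: faster).

-- ===== PORT A =====
-- while len(S) > 1: pair-or-drop via slicing, counting every operation.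
-- S[0]/S[-1] are only read under the guard len(S) > 1, so they are always in range
-- and the pyGetD default 0 is never used.
def solveLoopA (X : Int) (S : List Int) (num : Int) : Int :=
  if S.length > 1 then
    if PySem.List.pyGetD S 0 0 + PySem.List.pyGetD S (-1) 0 ≤ X then
      solveLoopA X (PySem.List.slice S (some 1) (some (-1))) (num + 1)
    else
      solveLoopA X (PySem.List.slice S none (some (-1))) (num + 1)
  else if S.length = 1 then num + 1 else num
termination_by S.length
decreasing_by
  · simp only [PySem.List.slice, PySem.List.clampIdx]
    split_ifs <;> simp_all [List.length_take, List.length_drop] <;> omega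
  · simp [PySem.List.slice_to_neg_one, List.length_dropLast]
    omega

def solve (N : Int) (X : Int) (S : List Int) : Int :=
  solveLoopA X (PySem.List.sorted S (fun x => x) false) 0

-- ===== PORT B =====
-- i/j two-pointer sweep counting matched pairs p; T[i], T[j] are only read
-- under 0 ≤ i < j < len T, so the pyGetD default 0 is never used.
def sweepB (X : Int) (T : List Int) (i j p : Int) : Int :=
  if i < j then
    if PySem.List.pyGetD T i 0 + PySem.List.pyGetD T j 0 ≤ X then
      sweepB X T (i + 1) (j - 1) (p + 1)
    else
      sweepB X T i (j - 1) p
  else p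
termination_by (j - i).toNat
decreasing_by
  · omega
  · omega

def solve_alt (N : Int) (X : Int) (S : List Int) : Int :=
  let T := PySem.List.sorted S (fun x => x) false
  (T.length : Int) - sweepB X T 0 ((T.length : Int) - 1) 0

-- ===== PRECONDITION & SPEC =====
def Spec_solve (N : Int) (X : Int) (S : List Int) (out : Int) : Prop := out = solve_alt N X S
instance (N : Int) (X : Int) (S : List Int) (out : Int) : Decidable (Spec_solve N X S out) := by unfold Spec_solve; infer_instance

-- ===== CLAIM (what is proved, stated in full; the proofs are below) =====
def Claim_equal_solve : Prop := ∀ (N : Int) (X : Int) (S : List Int), Dom_solve N X S → Spec_solve N X S (solve N X S)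

-- ===== LEMMAS AND PROOFS =====

-- B's loop does nothing once the pointers meet or cross
theorem sweepB_stop (X : Int) (T : List Int) (i j p : Int) (hij : ¬ i < j) :
    sweepB X T i j p = p := by
  rw [sweepB]
  simp [hij]

-- B's pair counter is an accumulator
theorem sweepB_acc (X : Int) (T : List Int) : ∀ (n : Nat) (i j p : Int), (j - i).toNat ≤ n →
    sweepB X T i j p = p + sweepB X T i j 0 := by
  intro n
  induction n with
  | zero =>
    intro i j p h
    have hij : ¬ i < j := by omega
    rw [sweepB_stop X T i j p hij, sweepB_stop X T i j 0 hij]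
    ring
  | succ n ih =>
    intro i j p h
    by_cases hij : i < j
    · conv_lhs => rw [sweepB]
      conv_rhs => rw [sweepB]
      simp only [hij, if_true]
      by_cases hc : PySem.List.pyGetD T i 0 + PySem.List.pyGetD T j 0 ≤ X
      · simp only [hc, if_true]
        rw [ih (i+1) (j-1) (p+1) (by omega), ih (i+1) (j-1) (0+1) (by omega)]
        ring
      · simp only [hc, if_false]
        rw [ih i (j-1) p (by omega), ih i (j-1) 0 (by omega)]
    · rw [sweepB_stop X T i j p hij, sweepB_stop X T i j 0 hij]
      ring

-- Python's w[1:-1] on a list of length ≥ 2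
theorem slice_one_neg_one (w : List Int) (h : 2 ≤ w.length) :
    PySem.List.slice w (some 1) (some (-1)) = w.tail.dropLast := by
  simp only [PySem.List.slice, PySem.List.clampIdx]
  split_ifs <;> simp_all [List.dropLast_eq_take]
  have hm : min 1 w.length = 1 := by omega
  rw [hm, List.drop_one]
  congr 1
  omega

-- shrinking the window at both ends
theorem window_tail_dropLast (T : List Int) (i j : Int) (hi : 0 ≤ i) (hij : i < j)
    (hj : j < (T.length : Int)) :
    ((T.drop i.toNat).take ((j - i + 1).toNat)).tail.dropLast
      = (T.drop (i + 1).toNat).take (((j - 1) - (i + 1) + 1).toNat) := by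
  apply List.ext_getElem
  · simp [List.length_dropLast, List.length_tail, List.length_take, List.length_drop]
    omega
  · intro k h1 h2
    simp only [List.getElem_dropLast, List.getElem_tail, List.getElem_take, List.getElem_drop]
    congr 1
    omega

-- shrinking the window at the right end only
theorem window_dropLast (T : List Int) (i j : Int) (hi : 0 ≤ i) (hij : i < j)
    (hj : j < (T.length : Int)) :
    ((T.drop i.toNat).take ((j - i + 1).toNat)).dropLast
      = (T.drop i.toNat).take (((j - 1) - i + 1).toNat) := by
  apply List.ext_getElem
  · simp [List.length_dropLast, List.length_take, List.length_drop]
    omega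
  · intro k h1 h2
    simp only [List.getElem_dropLast, List.getElem_take, List.getElem_drop]

-- the invariant: A's loop on the window T[i..j] counts (window size) - (pairs B matches)
theorem key_lemma (X : Int) : ∀ (n : Nat) (T : List Int) (i j num : Int),
    (j - i).toNat ≤ n → 0 ≤ i → j < (T.length : Int) →
    solveLoopA X ((T.drop i.toNat).take (j - i + 1).toNat) num
      = num + max (j - i + 1) 0 - sweepB X T i j 0 := by
  intro n
  induction n with
  | zero =>
    intro T i j num h hi hj
    have hij : ¬ i < j := by omega
    rw [sweepB_stop X T i j 0 hij, solveLoopA]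
    by_cases hieqj : i = j
    · subst hieqj
      have hlen : ((T.drop i.toNat).take (i - i + 1).toNat).length = 1 := by
        simp [List.length_take, List.length_drop]; omega
      simp only [hlen]
      norm_num
    · have hlen : ((T.drop i.toNat).take (j - i + 1).toNat).length = 0 := by
        simp [List.length_take]; omega
      simp only [hlen]
      norm_num
      omega
  | succ n ih =>
    intro T i j num h hi hj
    by_cases hij : i < j
    case neg =>
      rw [sweepB_stop X T i j 0 hij, solveLoopA]
      by_cases hieqj : i = j
      · subst hieqj
        have hlen : ((T.drop i.toNat).take (i - i + 1).toNat).length = 1 := by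
          simp [List.length_take, List.length_drop]; omega
        simp only [hlen]
        norm_num
      · have hlen : ((T.drop i.toNat).take (j - i + 1).toNat).length = 0 := by
          simp [List.length_take]; omega
        simp only [hlen]
        norm_num
        omega
    case pos =>
      set w : List Int := (T.drop i.toNat).take (j - i + 1).toNat with hw
      have hwlen : w.length = (j - i + 1).toNat := by
        simp [hw, List.length_take, List.length_drop]; omega
      have hwlen2 : 2 ≤ w.length := by omega
      have hTi : i.toNat < T.length := by omega
      have hTj : j.toNat < T.length := by omega
      have hw0 : PySem.List.pyGetD w 0 0 = T[i.toNat] := by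
        rw [PySem.List.pyGetD_eq_getElem w 0 (by omega) (by omega)]
        simp only [hw, Int.toNat_zero]
        rw [List.getElem_take, List.getElem_drop]
        simp
      have hwlast : PySem.List.pyGetD w (-1) 0 = T[j.toNat] := by
        have hne : w ≠ [] := by intro hnil; rw [hnil] at hwlen2; simp at hwlen2
        rw [PySem.List.pyGetD_neg_one w 0 hne, List.getLast_eq_getElem]
        have hgt : w[w.length - 1]'(by omega) = (T.drop i.toNat)[w.length - 1]'(by
            simp [List.length_drop]; omega) := by
          simp only [hw]
          rw [List.getElem_take]
        rw [hgt, List.getElem_drop]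
        congr 1
        omega
      have hcondw : PySem.List.pyGetD w 0 0 + PySem.List.pyGetD w (-1) 0
          = PySem.List.pyGetD T i 0 + PySem.List.pyGetD T j 0 := by
        rw [hw0, hwlast,
            PySem.List.pyGetD_eq_getElem T 0 hi (by omega),
            PySem.List.pyGetD_eq_getElem T 0 (by omega : (0:Int) ≤ j) (by omega)]
      have hwgt : w.length > 1 := by omega
      rw [solveLoopA]
      simp only [hwgt, if_true, hcondw]
      conv_rhs => rw [sweepB]
      simp only [hij, if_true]
      by_cases hc : PySem.List.pyGetD T i 0 + PySem.List.pyGetD T j 0 ≤ X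
      · simp only [hc, if_true]
        rw [slice_one_neg_one w hwlen2, hw,
            window_tail_dropLast T i j hi hij hj,
            ih T (i+1) (j-1) (num+1) (by omega) (by omega) (by omega),
            sweepB_acc X T ((j-1) - (i+1)).toNat (i+1) (j-1) (0+1) (by omega)]
        omega
      · simp only [hc, if_false]
        rw [PySem.List.slice_to_neg_one, hw,
            window_dropLast T i j hi hij hj,
            ih T i (j-1) (num+1) (by omega) hi (by omega)]
        omega

-- ===== VERDICT (by name: the statement is the Claim_ definition above) =====
theorem solve_spec : Claim_equal_solve := by
  intro N X S _
  unfold Spec_solve solve solve_alt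
  set T := PySem.List.sorted S (fun x => x) false with hT
  show solveLoopA X T 0
      = (T.length : Int) - sweepB X T 0 ((T.length : Int) - 1) 0
  have h0 : (T.drop (0 : Int).toNat).take (((T.length : Int) - 1) - 0 + 1).toNat = T := by
    simp
  have hk := key_lemma X ((((T.length : Int) - 1) - 0).toNat) T 0 ((T.length : Int) - 1) 0
    (le_refl _) (by omega) (by omega)
  rw [h0] at hk
  rw [hk]
  omega
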